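-- pv_equiv track=rewrite | github.com/NPrawn/Algorithm | 프로그래머스/2/389479. 서버 증설 횟수/서버 증설 횟수.py | solution
-- ===== SOURCE A (Python) =====
-- def solution(players, m, k):
--     answer = 0
--     base = m
--     lst = [0 for _ in range(50)]
--     for i, p in enumerate(players):
--         now = base+lst[i]
--         ct = 0
--         while p>=now:
--             answer+=1
--             now+=m
--             ct += m
--         for j in range(i, i+k):
--             lst[j]+=ct
--     return answer
-- ===== SOURCE B (Python) =====
-- def solution(players, m, k):
--     n = len(players)
--     expire = [0] * (n + 1)
--     answer = 0
--     cur = 0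
--     for i, p in enumerate(players):
--         cur -= expire[i]
--         need = p - m - cur
--         if need >= 0:
--             steps = need // m + 1
--             answer += steps
--             if k >= 1:
--                 ct = steps * m
--                 cur += ct
--                 if i + k <= n:
--                     expire[i + k] = ct
--     return answer
-- ===== Notes on version B (the rewrite author's own statement) =====
-- stated objective: faster
-- what changed: B replaces A's per-hour increment-by-m while loop and the k-wide range update of a 50-slot array by a closed-form floor-division count of added servers plus a single-expiry difference accumulator, making each hour O(1).
import Mathlib
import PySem

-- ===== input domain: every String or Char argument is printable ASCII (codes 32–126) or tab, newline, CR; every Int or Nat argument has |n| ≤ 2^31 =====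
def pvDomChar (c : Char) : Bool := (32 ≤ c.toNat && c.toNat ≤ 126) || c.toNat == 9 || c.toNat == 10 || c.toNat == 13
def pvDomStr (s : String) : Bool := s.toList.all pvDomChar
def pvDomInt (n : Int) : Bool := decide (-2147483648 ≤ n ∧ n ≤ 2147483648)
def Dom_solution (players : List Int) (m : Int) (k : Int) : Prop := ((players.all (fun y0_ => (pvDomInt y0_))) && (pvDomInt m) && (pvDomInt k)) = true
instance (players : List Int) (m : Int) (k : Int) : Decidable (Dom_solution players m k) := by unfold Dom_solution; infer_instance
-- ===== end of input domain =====

-- B replaces A's per-hour while loop and k-wide range update by a closed-form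
-- division count plus a single-expiry difference accumulator (objective: faster).

-- ===== PORT A =====
-- fuel-bounded transliteration of A's `while p>=now` loop; fuel only guards totality
def whileA : Nat → Int → Int → Int → Int → Int → Int × Int
  | 0, _, _, _, answer, ct => (answer, ct)
  | Nat.succ f, p, now, m, answer, ct =>
    if now ≤ p then whileA f p (now + m) m (answer + 1) (ct + m) else (answer, ct)

def stepA (m k : Int) (st : Int × List Int) (ip : Int × Int) : Int × List Int :=
  let now := m + PySem.List.pyGetD st.2 ip.1 0
  let r := whileA (ip.2 + 1 - now).toNat ip.2 now m st.1 0
  (r.1, (PySem.List.pyRange ip.1 (ip.1 + k) 1).foldl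
          (fun l j => PySem.List.pySetD l j (PySem.List.pyGetD l j 0 + r.2)) st.2)

def solution (players : List Int) (m : Int) (k : Int) : Int :=
  ((PySem.List.enumerate players 0).foldl (stepA m k) (0, List.replicate 50 0)).1

-- ===== PORT B =====
def stepB (m k n : Int) (st : Int × Int × List Int) (ip : Int × Int) : Int × Int × List Int :=
  let cur := st.2.1 - PySem.List.pyGetD st.2.2 ip.1 0
  let need := ip.2 - m - cur
  if 0 ≤ need then
    let steps := PySem.Int.floordiv need m + 1
    if 1 ≤ k then
      let ct := steps * m
      (st.1 + steps, cur + ct,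
        if ip.1 + k ≤ n then PySem.List.pySetD st.2.2 (ip.1 + k) ct else st.2.2)
    else (st.1 + steps, cur, st.2.2)
  else (st.1, cur, st.2.2)

def solution_alt (players : List Int) (m : Int) (k : Int) : Int :=
  ((PySem.List.enumerate players 0).foldl (stepB m k (players.length : Int))
      (0, 0, List.replicate (players.length + 1) 0)).1

-- ===== PRECONDITION & SPEC =====
-- Pre_ is exactly where the Python A returns: it excludes only inputs where A raises
-- IndexError on the 50-slot list (length > 50, or k ≥ 1 with length + k > 51) and
-- inputs where A's while loop diverges (m ≤ 0 with some player ≥ m).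
def Pre_solution (players : List Int) (m : Int) (k : Int) : Prop :=
  players.length ≤ 50 ∧ (players ≠ [] → 1 ≤ k → (players.length : Int) + k ≤ 51) ∧
    (1 ≤ m ∨ ∀ p ∈ players, p < m)
instance (players : List Int) (m : Int) (k : Int) : Decidable (Pre_solution players m k) := by
  unfold Pre_solution; infer_instance

def pvWitness_solution : List Int × Int × Int := ([0, 2, 34, 5, 8], 5, 2)

def Spec_solution (players : List Int) (m : Int) (k : Int) (out : Int) : Prop := out = solution_alt players m k
instance (players : List Int) (m : Int) (k : Int) (out : Int) : Decidable (Spec_solution players m k out) := by unfold Spec_solution; infer_instance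

-- ===== CLAIM (what is proved, stated in full; the proofs are below) =====
def Claim_equal_solution : Prop := ∀ (players : List Int) (m : Int) (k : Int), Dom_solution players m k → Pre_solution players m k → Spec_solution players m k (solution players m k)

-- ===== LEMMAS AND PROOFS =====

-- number of iterations of A's while loop, in closed form
def wsteps (p now m : Int) : Int := if now ≤ p then PySem.Int.floordiv (p - now) m + 1 else 0

theorem getD_set_int (l : List Int) (a j : Nat) (v : Int) :
    (l.set a v).getD j 0 = if a = j ∧ a < l.length then v else l.getD j 0 := by
  simp only [List.getD_eq_getElem?_getD, List.getElem?_set]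
  by_cases hj : j < l.length
  · split_ifs with h1 h2 h2 <;> simp_all <;> omega
  · split_ifs with h1 h2 h2 <;> simp_all <;> omega

theorem rep_getD (n j : Nat) : (List.replicate n (0:Int)).getD j 0 = 0 := by
  simp only [List.getD_eq_getElem?_getD, List.getElem?_replicate]
  split_ifs <;> simp

theorem whileA_closed (m : Int) (hm : 1 ≤ m) : ∀ (fuel : Nat) (p now answer ct : Int),
    p + 1 - now ≤ (fuel : Int) →
    whileA fuel p now m answer ct = (answer + wsteps p now m, ct + wsteps p now m * m) := by
  intro fuel
  induction fuel with
  | zero =>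
    intro p now answer ct h
    have hnp : ¬ now ≤ p := by simpa using by omega
    simp [whileA, wsteps, hnp]
  | succ f ih =>
    intro p now answer ct h
    by_cases hnp : now ≤ p
    · simp only [whileA, if_pos hnp]
      rw [ih p (now + m) (answer + 1) (ct + m) (by push_cast at h ⊢; omega)]
      have hw : wsteps p now m = wsteps p (now + m) m + 1 := by
        unfold wsteps
        by_cases h2 : now + m ≤ p
        · rw [if_pos hnp, if_pos h2]
          have h3 : PySem.Int.floordiv (p - now) m = PySem.Int.floordiv (p - (now + m)) m + 1 := by
            rw [PySem.Int.floordiv_eq_ediv_of_pos (by omega), PySem.Int.floordiv_eq_ediv_of_pos (by omega)]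
            have h4 : p - now = (p - (now + m)) + 1 * m := by ring
            rw [h4, Int.add_mul_ediv_right _ _ (by omega : m ≠ 0)]
          omega
        · rw [if_pos hnp, if_neg h2]
          have h3 : PySem.Int.floordiv (p - now) m = 0 := by
            rw [PySem.Int.floordiv_eq_ediv_of_pos (by omega)]
            exact Int.ediv_eq_zero_of_lt (by omega) (by omega)
          omega
      rw [hw, Prod.mk.injEq]
      constructor <;> ring
    · have h0 : wsteps p now m = 0 := by simp [wsteps, hnp]
      simp [whileA, hnp, h0]

theorem rangeUpd_nat (ct : Int) (i : Nat) : ∀ (c : Nat) (lst : List Int), i + c ≤ lst.length →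
    ((PySem.List.pyRange (i:Int) ((i:Int) + (c:Int)) 1).foldl
        (fun l j => PySem.List.pySetD l j (PySem.List.pyGetD l j 0 + ct)) lst).length = lst.length ∧
    ∀ j : Nat, ((PySem.List.pyRange (i:Int) ((i:Int) + (c:Int)) 1).foldl
        (fun l j => PySem.List.pySetD l j (PySem.List.pyGetD l j 0 + ct)) lst).getD j 0
      = lst.getD j 0 + (if i ≤ j ∧ j < i + c then ct else 0) := by
  intro c
  induction c with
  | zero =>
    intro lst _
    rw [PySem.List.pyRange_one_eq_nil (by omega)]
    refine ⟨rfl, fun j => ?_⟩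
    have hno : ¬ (i ≤ j ∧ j < i + 0) := by omega
    rw [if_neg hno]
    simp
  | succ c ih =>
    intro lst hlen
    have hsplit : PySem.List.pyRange (i:Int) ((i:Int) + ((c:Nat)+1 : Nat)) 1
        = PySem.List.pyRange (i:Int) ((i:Int) + (c:Int)) 1 ++ [(i:Int) + (c:Int)] := by
      have h1 : ((i:Int) + ((c:Nat)+1 : Nat)) = ((i:Int) + (c:Int)) + 1 := by push_cast; ring
      rw [h1, PySem.List.pyRange_one_succ_right (by omega)]
    rw [hsplit, List.foldl_append]
    obtain ⟨ihlen, ihget⟩ := ih lst (by omega)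
    set L := (PySem.List.pyRange (i:Int) ((i:Int) + (c:Int)) 1).foldl
        (fun l j => PySem.List.pySetD l j (PySem.List.pyGetD l j 0 + ct)) lst with hL
    have hcast : (i:Int) + (c:Int) = ((i + c : Nat) : Int) := by push_cast; ring
    simp only [List.foldl_cons, List.foldl_nil, hcast, PySem.List.pySetD_natCast,
      PySem.List.pyGetD_natCast]
    constructor
    · rw [List.length_set, ihlen]
    · intro j
      rw [getD_set_int, ihlen, ihget j]
      have hic : i + c < lst.length := by omega
      by_cases hj : i + c = j
      · subst hj
        rw [if_pos ⟨rfl, hic⟩, ihget (i + c), if_neg (by omega), if_pos (by omega)]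
        ring
      · rw [if_neg (fun hcon => hj hcon.1)]
        have h3 : (i ≤ j ∧ j < i + c) ↔ (i ≤ j ∧ j < i + (c+1)) := by omega
        simp only [h3]

theorem rangeUpd (ct : Int) (i : Nat) (k : Int) (lst : List Int)
    (h : 1 ≤ k → (i:Int) + k ≤ (lst.length : Int)) :
    ((PySem.List.pyRange (i:Int) ((i:Int) + k) 1).foldl
        (fun l j => PySem.List.pySetD l j (PySem.List.pyGetD l j 0 + ct)) lst).length = lst.length ∧
    ∀ j : Nat, ((PySem.List.pyRange (i:Int) ((i:Int) + k) 1).foldl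
        (fun l j => PySem.List.pySetD l j (PySem.List.pyGetD l j 0 + ct)) lst).getD j 0
      = lst.getD j 0 + (if (i:Int) ≤ (j:Int) ∧ (j:Int) < (i:Int) + k then ct else 0) := by
  by_cases hk : 1 ≤ k
  · have hc : k = ((k.toNat : Nat) : Int) := by omega
    rw [hc]
    obtain ⟨h1, h2⟩ := rangeUpd_nat ct i k.toNat lst (by omega)
    refine ⟨h1, fun j => ?_⟩
    rw [h2]
    have h3 : ((i:Int) ≤ (j:Int) ∧ (j:Int) < (i:Int) + ((k.toNat : Nat) : Int)) ↔ (i ≤ j ∧ j < i + k.toNat) := by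
      constructor <;> intro hx <;> constructor <;> omega
    simp only [h3]
  · rw [PySem.List.pyRange_one_eq_nil (by omega)]
    refine ⟨rfl, fun j => ?_⟩
    have hno : ¬ ((i:Int) ≤ (j:Int) ∧ (j:Int) < (i:Int) + k) := by omega
    rw [if_neg hno]
    simp

theorem mainInv (m k : Int) (n : Nat) (hn : n ≤ 50) (hk : 1 ≤ k → (n:Int) + k ≤ 51) :
    ∀ (rest : List Int) (i : Nat) (answer cur : Int) (lstA expire : List Int),
    (1 ≤ m ∨ ((∀ p ∈ rest, p < m) ∧ cur = 0 ∧ ∀ j : Nat, expire.getD j 0 = 0)) →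
    i + rest.length = n →
    lstA.length = 50 → expire.length = n + 1 →
    (∀ j : Nat, i ≤ j → j < n → lstA.getD j 0 = cur - ∑ l ∈ Finset.Ico i (j+1), expire.getD l 0) →
    (∀ j : Nat, (i:Int) + k ≤ (j:Int) → expire.getD j 0 = 0) →
    ((PySem.List.enumerate rest (i:Int)).foldl (stepA m k) (answer, lstA)).1 =
    ((PySem.List.enumerate rest (i:Int)).foldl (stepB m k (n:Int)) (answer, cur, expire)).1 := by
  intro rest
  induction rest with
  | nil =>
    intro i answer cur lstA expire _ _ _ _ _ _
    simp [PySem.List.enumerate_nil]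
  | cons p rest' ih =>
    intro i answer cur lstA expire hm hlen hA hE hinv hzero
    rw [PySem.List.enumerate_cons]
    simp only [List.foldl_cons]
    have hi_n : i < n := by
      simp only [List.length_cons] at hlen; omega
    have hei_sum : (∑ l ∈ Finset.Ico i (i+1), expire.getD l 0) = expire.getD i 0 := by
      rw [Finset.sum_Ico_succ_top (le_refl i), Finset.Ico_self, Finset.sum_empty, zero_add]
    have hAi : lstA.getD i 0 = cur - expire.getD i 0 := by
      rw [hinv i (le_refl i) hi_n, hei_sum]
    -- notation
    set ei := expire.getD i 0 with hei
    set cur' := cur - ei with hcur'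
    set st := wsteps p (m + cur') m with hst
    set ct := st * m with hct
    -- the while loop computes (answer + st, st * m)
    have hwhile : whileA (p + 1 - (m + PySem.List.pyGetD lstA (i:Int) 0)).toNat p
        (m + PySem.List.pyGetD lstA (i:Int) 0) m answer 0 = (answer + st, ct) := by
      rw [PySem.List.pyGetD_natCast, hAi]
      rcases hm with hm1 | ⟨hall, hcur0, hez⟩
      · rw [whileA_closed m hm1 _ p _ answer 0 (by omega), zero_add]
      · have hpz : p < m := hall p (List.mem_cons_self)
        have he0 : ei = 0 := hez i
        have hnow : cur - ei = 0 := by omega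
        have hfz : (p + 1 - (m + (cur - ei))).toNat = 0 := by omega
        have hstz : st = 0 := by
          rw [hst]; unfold wsteps; rw [if_neg (by omega)]
        have hctz : ct = 0 := by rw [hct, hstz]; ring
        rw [hfz, hstz, hctz]
        simp [whileA]
    have hstepA : stepA m k (answer, lstA) ((i:Int), p)
        = (answer + st, (PySem.List.pyRange (i:Int) ((i:Int) + k) 1).foldl
            (fun l j => PySem.List.pySetD l j (PySem.List.pyGetD l j 0 + ct)) lstA) := by
      simp only [stepA, hwhile]
    -- B's step
    have hpgB : PySem.List.pyGetD expire (i:Int) 0 = ei := PySem.List.pyGetD_natCast expire i 0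
    have hneed : (0 ≤ p - m - cur') ↔ (m + cur' ≤ p) := by omega
    have hsteps : (m + cur' ≤ p) → PySem.Int.floordiv (p - m - cur') m + 1 = st := by
      intro hle
      rw [hst]; unfold wsteps; rw [if_pos hle]
      congr 1
      congr 1
      ring
    have hstz' : ¬ (m + cur' ≤ p) → st = 0 := by
      intro hgt; rw [hst]; unfold wsteps; rw [if_neg hgt]
    -- lstA' characterisation
    have hbound : 1 ≤ k → (i:Int) + k ≤ (lstA.length : Int) := by
      intro hk1; rw [hA]; have := hk hk1; omega
    obtain ⟨hlen', hget'⟩ := rangeUpd ct i k lstA hbound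
    set lstA' := (PySem.List.pyRange (i:Int) ((i:Int) + k) 1).foldl
        (fun l j => PySem.List.pySetD l j (PySem.List.pyGetD l j 0 + ct)) lstA with hlstA'
    have hlenA' : (i + 1) + rest'.length = n := by
      simp only [List.length_cons] at hlen; omega
    have hsum_split : ∀ j : Nat, i + 1 ≤ j → (∑ l ∈ Finset.Ico i (j+1), expire.getD l 0)
        = ei + ∑ l ∈ Finset.Ico (i+1) (j+1), expire.getD l 0 := by
      intro j hj
      rw [Finset.sum_eq_sum_Ico_succ_bot (by omega)]
    have hcast1 : ((i:Int) + 1) = (((i+1 : Nat)) : Int) := by push_cast; ring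
    by_cases hc : (m + cur' ≤ p) ∧ 1 ≤ k
    · obtain ⟨hle, hk1⟩ := hc
      -- B takes the capacity branch
      set expire' := if (i:Int) + k ≤ (n:Int) then PySem.List.pySetD expire ((i:Int) + k) ct
          else expire with hexp'
      have hstepB : stepB m k (n:Int) (answer, cur, expire) ((i:Int), p)
          = (answer + st, cur' + ct, expire') := by
        simp only [stepB, hpgB]
        rw [if_pos (by omega), if_pos hk1, hsteps hle]
      -- expire' as a set
      have hkt : ((i:Int) + k).toNat = i + k.toNat := by omega
      have hexpget : ∀ l : Nat, expire'.getD l 0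
          = expire.getD l 0 + (if l = i + k.toNat then (if (i:Int) + k ≤ (n:Int) then ct else 0) else 0) := by
        intro l
        rw [hexp']
        by_cases hkn : (i:Int) + k ≤ (n:Int)
        · rw [if_pos hkn, PySem.List.pySetD_of_nonneg expire ct (by omega), hkt, getD_set_int]
          by_cases hl : i + k.toNat = l
          · rw [if_pos ⟨hl, by rw [hE]; omega⟩, if_pos hl.symm, if_pos hkn]
            rw [← hl]
            have h0 : expire.getD (i + k.toNat) 0 = 0 := hzero _ (by omega)
            omega
          · rw [if_neg (fun hcc => hl hcc.1), if_neg (fun hcc => hl hcc.symm)]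
            ring
        · rw [if_neg hkn]
          by_cases hl : l = i + k.toNat <;> simp [hl, hkn]
      have hexplen : expire'.length = n + 1 := by
        rw [hexp']
        by_cases hkn : (i:Int) + k ≤ (n:Int)
        · rw [if_pos hkn, PySem.List.length_pySetD, hE]
        · rw [if_neg hkn, hE]
      have hsum' : ∀ j : Nat, i + 1 ≤ j → j < n →
          (∑ l ∈ Finset.Ico (i+1) (j+1), expire'.getD l 0)
          = (∑ l ∈ Finset.Ico (i+1) (j+1), expire.getD l 0)
            + (if (i:Int) + k ≤ (j:Int) then ct else 0) := by
        intro j hj hjn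
        rw [Finset.sum_congr rfl (fun l _ => hexpget l), Finset.sum_add_distrib]
        congr 1
        rw [Finset.sum_ite_eq' (Finset.Ico (i+1) (j+1)) (i + k.toNat)
          (fun _ => (if (i:Int) + k ≤ (n:Int) then ct else 0))]
        by_cases hjk : (i:Int) + k ≤ (j:Int)
        · rw [if_pos (by simp [Finset.mem_Ico]; omega), if_pos (by omega), if_pos hjk]
        · rw [if_neg (by simp [Finset.mem_Ico]; omega), if_neg hjk]
      rw [hstepA, hstepB, hcast1]
      apply ih (i+1) (answer + st) (cur' + ct) lstA' expire'
      · rcases hm with hm1 | ⟨hall, hcur0, hez⟩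
        · exact Or.inl hm1
        · have h1 : p < m := hall p List.mem_cons_self
          have h2 := hez i
          exact absurd hle (by omega)
      · exact hlenA'
      · rw [hlen', hA]
      · exact hexplen
      · intro j hj hjn
        rw [hget' j, hinv j (by omega) hjn, hsum_split j hj, hsum' j hj hjn]
        have htriv : (i:Int) ≤ (j:Int) := by omega
        by_cases hjk : (i:Int) + k ≤ (j:Int)
        · rw [if_neg (by omega), if_pos hjk]
          omega
        · rw [if_pos ⟨htriv, by omega⟩, if_neg hjk]
          omega
      · intro j hj
        rw [hexpget j]
        have h1 : expire.getD j 0 = 0 := hzero j (by push_cast at hj ⊢; omega)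
        have h2 : ¬ (j = i + k.toNat) := by push_cast at hj; omega
        rw [h1, if_neg h2]
        ring
    · -- B leaves cur and expire unchanged (no capacity added, or k < 1)
      have hstepB : stepB m k (n:Int) (answer, cur, expire) ((i:Int), p)
          = (answer + st, cur', expire) := by
        simp only [stepB, hpgB]
        by_cases hle : m + cur' ≤ p
        · have hk1 : ¬ 1 ≤ k := fun h => hc ⟨hle, h⟩
          rw [if_pos (by omega), if_neg hk1, hsteps hle]
        · rw [if_neg (by omega), hstz' hle]
          simp [hcur']
      have hctz : ∀ j : Nat, i + 1 ≤ j → (if (i:Int) ≤ (j:Int) ∧ (j:Int) < (i:Int) + k then ct else 0) = 0 := by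
        intro j hj
        by_cases hle : m + cur' ≤ p
        · have hk1 : ¬ 1 ≤ k := fun h => hc ⟨hle, h⟩
          rw [if_neg (by omega)]
        · rw [hct, hstz' hle]
          simp
      rw [hstepA, hstepB, hcast1]
      apply ih (i+1) (answer + st) cur' lstA' expire
      · rcases hm with hm1 | ⟨hall, hcur0, hez⟩
        · exact Or.inl hm1
        · have h2 := hez i
          exact Or.inr ⟨fun q hq => hall q (List.mem_cons_of_mem p hq), by omega, hez⟩
      · exact hlenA'
      · rw [hlen', hA]
      · exact hE
      · intro j hj hjn
        rw [hget' j, hinv j (by omega) hjn, hsum_split j hj, hctz j hj]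
        ring
      · intro j hj
        exact hzero j (by push_cast at hj ⊢; omega)

-- ===== VERDICT (by name: the statement is the Claim_ definition above) =====
theorem solution_spec : Claim_equal_solution := by
  intro players m k _ hpre
  obtain ⟨h50, hk, hm⟩ := hpre
  unfold Spec_solution solution solution_alt
  cases hps : players with
  | nil => rfl
  | cons q qs => ?_
  rw [← hps]
  have hne : players ≠ [] := by rw [hps]; exact List.cons_ne_nil q qs
  have h0 : (0 : Int) = ((0 : Nat) : Int) := rfl
  rw [h0]
  exact (mainInv m k players.length h50 (hk hne) players 0 0 0 (List.replicate 50 0)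
    (List.replicate (players.length + 1) 0)
    (by
      rcases hm with hm1 | hall
      · exact Or.inl hm1
      · exact Or.inr ⟨hall, rfl, fun j => rep_getD _ j⟩)
    (by omega)
    (List.length_replicate)
    (List.length_replicate)
    (by
      intro j _ _
      rw [rep_getD, Finset.sum_eq_zero (fun l _ => rep_getD _ l)]
      ring)
    (fun j _ => rep_getD _ j)).symm.symm
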